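-- pv_equiv track=rewrite | github.com/Matteo-Candi/Master-Thesis | results/test_01/test_01_formatted.py | solve
-- ===== SOURCE A (Python) =====
-- def solve(values, salary, mod):
--     ret = 1
--     amt = 0
--     values.sort()
--     salary.sort()
--     while len(salary) > 0:
--         while len(values) > 0 and values[-1] >= salary[-1]:
--             amt += 1
--             values.pop()
--         if amt == 0:
--             return 0
--         ret *= amt
--         ret %= mod
--         salary.pop()
--     return ret
-- ===== SOURCE B (Python) =====
-- def _lowbound(vs, x):
--     # index of the first element of the sorted list vs that is >= x (binary search)
--     lo, hi = 0, len(vs)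
--     while lo < hi:
--         m = (lo + hi) // 2
--         if vs[m] < x:
--             lo = m + 1
--         else:
--             hi = m
--     return lo
--
--
-- def solve(values, salary, mod):
--     # Non-destructive: sort copies, then for each salary (largest first) count the
--     # values >= it by binary search instead of destructively popping them.
--     vs = sorted(values)
--     ret = 1
--     for s in sorted(salary, reverse=True):
--         c = len(vs) - _lowbound(vs, s)
--         if c == 0:
--             return 0
--         ret = ret * c % mod
--     return ret
-- ===== Notes on version B (the rewrite author's own statement) =====
-- stated objective: alternative
-- what changed: Replaces A's destructive cumulative pop loop (sort both lists, repeatedly pop values >= the current largest salary off the end while carrying a running counter) with a non-mutating binary-search formulation: for each salary in descending order, count the values >= it directly by a hand-written lower-bound binary search on the sorted values; the equivalence is about the return value only, since A mutates its list arguments and B does not.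
import Mathlib
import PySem

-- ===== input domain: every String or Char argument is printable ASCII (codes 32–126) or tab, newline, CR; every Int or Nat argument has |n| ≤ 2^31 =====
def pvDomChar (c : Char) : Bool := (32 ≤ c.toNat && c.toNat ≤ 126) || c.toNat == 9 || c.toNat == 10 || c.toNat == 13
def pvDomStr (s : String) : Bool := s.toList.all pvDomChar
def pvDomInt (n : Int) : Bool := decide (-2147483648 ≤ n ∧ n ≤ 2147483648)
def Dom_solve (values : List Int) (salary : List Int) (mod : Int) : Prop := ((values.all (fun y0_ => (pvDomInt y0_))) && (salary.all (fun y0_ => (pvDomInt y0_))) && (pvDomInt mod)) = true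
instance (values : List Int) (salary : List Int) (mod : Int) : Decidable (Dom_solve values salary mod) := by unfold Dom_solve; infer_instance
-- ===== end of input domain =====

-- B replaces A's destructive pop-and-count loop with a non-mutating binary-search count per salary
-- (alternative formulation, no speed claim); return-value equivalence only: Python A mutates its
-- list arguments (empties salary, truncates values), Python B does not.

-- ===== PORT A =====
-- Python pops from the END of the sorted lists; the port works on the REVERSED sorted lists so
-- that values[-1] / .pop() / salary.pop() become head access / tail — the same values in the
-- same order of use.
def solvePop (s : Int) : List Int → Int → (List Int × Int)
  | [], amt => ([], amt)
  | v :: rest, amt =>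
      if s ≤ v then solvePop s rest (amt + 1) else (v :: rest, amt)

def solveLoop (mod : Int) : List Int → List Int → Int → Int → Int
  | [], _, _, ret => ret
  | s :: srest, vals, amt, ret =>
      let p := solvePop s vals amt
      if p.2 = 0 then 0
      else solveLoop mod srest p.1 p.2 (PySem.Int.mod (ret * p.2) mod)

def solve (values : List Int) (salary : List Int) (mod : Int) : Int :=
  solveLoop mod ((PySem.List.sorted salary (fun x => x)).reverse)
    ((PySem.List.sorted values (fun x => x)).reverse) 0 1

-- ===== PORT B =====
-- transliteration of Source B's _lowbound: 'while lo < hi' binary search; lo, hi, m are nonnegative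
-- Python ints, so Nat with Nat division is exact for m = (lo+hi)//2 (m is inlined below), and
-- vs[m] is always in range (lo ≤ m < hi ≤ len vs), so getD is exact.
def lowbound (vs : List Int) (x : Int) (lo hi : Nat) : Nat :=
  if _h : lo < hi then
    if vs.getD ((lo + hi) / 2) 0 < x then lowbound vs x ((lo + hi) / 2 + 1) hi
    else lowbound vs x lo ((lo + hi) / 2)
  else lo
termination_by hi - lo
decreasing_by all_goals omega

def solveAltLoop (mod : Int) (vs : List Int) : List Int → Int → Int
  | [], ret => ret
  | s :: rest, ret =>
      let c : Int := (vs.length : Int) - (lowbound vs s 0 vs.length : Int)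
      if c = 0 then 0
      else solveAltLoop mod vs rest (PySem.Int.mod (ret * c) mod)

def solve_alt (values : List Int) (salary : List Int) (mod : Int) : Int :=
  solveAltLoop mod (PySem.List.sorted values (fun x => x))
    (PySem.List.sorted salary (fun x => x) true) 1

-- ===== PRECONDITION & SPEC =====
-- Pre_ excludes exactly the inputs on which Python A raises ZeroDivisionError (ret %= 0 is
-- reached: mod = 0, salary nonempty, and some value reaches the largest salary); Python B
-- raises ZeroDivisionError on exactly the same inputs.
def Pre_solve (values : List Int) (salary : List Int) (mod : Int) : Prop :=
  salary = [] ∨ mod ≠ 0 ∨ (∀ v ∈ values, ∃ s ∈ salary, v < s)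
instance (values : List Int) (salary : List Int) (mod : Int) : Decidable (Pre_solve values salary mod) := by unfold Pre_solve; infer_instance

def pvWitness_solve : List Int × List Int × Int := ([1, 3, 2], [2, 2], 10)

def Spec_solve (values : List Int) (salary : List Int) (mod : Int) (out : Int) : Prop := out = solve_alt values salary mod
instance (values : List Int) (salary : List Int) (mod : Int) (out : Int) : Decidable (Spec_solve values salary mod out) := by unfold Spec_solve; infer_instance

-- ===== CLAIM (what is proved, stated in full; the proofs are below) =====
def Claim_equal_solve : Prop := ∀ (values : List Int) (salary : List Int) (mod : Int), Dom_solve values salary mod → Pre_solve values salary mod → Spec_solve values salary mod (solve values salary mod)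

-- ===== LEMMAS AND PROOFS =====

-- number of elements of vs that are ≥ s (the ghost quantity both loops compute per salary)
def cntGe (vs : List Int) (s : Int) : Nat := (vs.filter (fun v => decide (s ≤ v))).length

-- common reference loop: both ports reduce to it
def loopC (mod : Int) (vs : List Int) : List Int → Int → Int
  | [], ret => ret
  | s :: rest, ret =>
      if (cntGe vs s : Int) = 0 then 0
      else loopC mod vs rest (PySem.Int.mod (ret * (cntGe vs s : Int)) mod)

lemma lowbound_spec (vs : List Int) (x : Int) (hs : vs.Pairwise (· ≤ ·)) :
    ∀ fuel lo hi, hi - lo ≤ fuel → lo ≤ hi → hi ≤ vs.length →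
    (∀ j, j < lo → ∀ hj : j < vs.length, vs[j] < x) →
    (∀ j, hi ≤ j → ∀ hj : j < vs.length, x ≤ vs[j]) →
    lowbound vs x lo hi ≤ vs.length ∧
    (∀ j, j < lowbound vs x lo hi → ∀ hj : j < vs.length, vs[j] < x) ∧
    (∀ j, lowbound vs x lo hi ≤ j → ∀ hj : j < vs.length, x ≤ vs[j]) := by
  intro fuel
  induction fuel with
  | zero =>
    intro lo hi hf h1 h2 hlo hhi
    rw [lowbound, dif_neg (by omega : ¬ lo < hi)]
    exact ⟨by omega, hlo, fun j hj hjl => hhi j (by omega) hjl⟩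
  | succ n ihf =>
    intro lo hi hf h1 h2 hlo hhi
    by_cases h : lo < hi
    · rw [lowbound, dif_pos h]
      have hmlen : (lo + hi) / 2 < vs.length := by omega
      have hget : vs.getD ((lo + hi) / 2) 0 = vs[(lo + hi) / 2] := List.getD_eq_getElem vs 0 hmlen
      by_cases hc : vs.getD ((lo + hi) / 2) 0 < x
      · rw [if_pos hc]
        refine ihf ((lo + hi) / 2 + 1) hi (by omega) (by omega) h2 ?_ hhi
        intro j hj hjl
        rcases Nat.lt_or_ge j lo with hj2 | hj2
        · exact hlo j hj2 hjl
        · have hx : vs[(lo + hi) / 2] < x := by rwa [hget] at hc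
          rcases Nat.eq_or_lt_of_le (by omega : j ≤ (lo + hi) / 2) with he | hl
          · subst he; exact hx
          · exact lt_of_le_of_lt (List.pairwise_iff_getElem.mp hs j _ hjl hmlen hl) hx
      · rw [if_neg hc]
        refine ihf lo ((lo + hi) / 2) (by omega) (by omega) (by omega) hlo ?_
        intro j hj hjl
        have hx : x ≤ vs[(lo + hi) / 2] := by rw [← hget]; omega
        rcases Nat.eq_or_lt_of_le hj with he | hl
        · subst he; exact hx
        · exact le_trans hx (List.pairwise_iff_getElem.mp hs _ j hmlen hjl hl)
    · rw [lowbound, dif_neg h]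
      exact ⟨by omega, hlo, fun j hj hjl => hhi j (by omega) hjl⟩

lemma lowbound_eq (vs : List Int) (x : Int) (hs : vs.Pairwise (· ≤ ·)) :
    lowbound vs x 0 vs.length = vs.length - cntGe vs x ∧ cntGe vs x ≤ vs.length := by
  obtain ⟨hle, h1, h2⟩ := lowbound_spec vs x hs vs.length 0 vs.length (by omega) (by omega) le_rfl
    (fun j hj _ => absurd hj (Nat.not_lt_zero j))
    (fun j hj hjl => absurd (lt_of_le_of_lt hj hjl) (lt_irrefl _))
  set lb := lowbound vs x 0 vs.length with hlb
  have hfilter : vs.filter (fun v => decide (x ≤ v)) = vs.drop lb := by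
    conv_lhs => rw [← List.take_append_drop lb vs]
    rw [List.filter_append]
    have hta : (vs.take lb).filter (fun v => decide (x ≤ v)) = [] := by
      refine List.filter_eq_nil_iff.mpr ?_
      intro a ha
      obtain ⟨j, hj, he⟩ := List.mem_iff_getElem.mp ha
      have hjlb : j < lb := by rw [List.length_take] at hj; omega
      have hjlen : j < vs.length := by rw [List.length_take] at hj; omega
      have hgt : (vs.take lb)[j] = vs[j] := List.getElem_take
      simp only [decide_eq_true_eq]
      rw [← he, hgt]
      exact not_le.mpr (h1 j hjlb hjlen)
    have htb : (vs.drop lb).filter (fun v => decide (x ≤ v)) = vs.drop lb := by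
      refine List.filter_eq_self.mpr ?_
      intro a ha
      obtain ⟨j, hj, he⟩ := List.mem_iff_getElem.mp ha
      have hjlen : lb + j < vs.length := by rw [List.length_drop] at hj; omega
      have hgd : (vs.drop lb)[j] = vs[lb + j] := List.getElem_drop
      simp only [decide_eq_true_eq]
      rw [← he, hgd]
      exact h2 (lb + j) (by omega) hjlen
    rw [hta, htb, List.nil_append]
  constructor
  · unfold cntGe; rw [hfilter, List.length_drop]; omega
  · unfold cntGe; rw [hfilter, List.length_drop]; omega

lemma loopB_eq_loopC (mod : Int) (vs : List Int) (hs : vs.Pairwise (· ≤ ·)) :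
    ∀ (saD : List Int) (ret : Int),
      solveAltLoop mod vs saD ret = loopC mod vs saD ret := by
  intro saD
  induction saD with
  | nil => intro ret; rfl
  | cons s rest ih =>
    intro ret
    have hc : (vs.length : Int) - (lowbound vs s 0 vs.length : Int) = (cntGe vs s : Int) := by
      obtain ⟨ha, hb⟩ := lowbound_eq vs s hs
      omega
    simp only [solveAltLoop, loopC, hc]
    by_cases h0 : (cntGe vs s : Int) = 0
    · rw [if_pos h0, if_pos h0]
    · rw [if_neg h0, if_neg h0, ih]

lemma takeWhile_eq_filter_of_desc (s : Int) : ∀ (d : List Int), d.Pairwise (fun a b => b ≤ a) →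
    d.takeWhile (fun v => decide (s ≤ v)) = d.filter (fun v => decide (s ≤ v)) := by
  intro d
  induction d with
  | nil => intro _; rfl
  | cons v t ihd =>
    intro hd
    rcases List.pairwise_cons.mp hd with ⟨hv, ht⟩
    by_cases h : s ≤ v
    · simp [h, ihd ht]
    · have hnil : t.filter (fun v => decide (s ≤ v)) = [] := by
        refine List.filter_eq_nil_iff.mpr ?_
        intro a ha
        simp only [decide_eq_true_eq]
        have := hv a ha
        omega
      simp [h, hnil]

lemma solvePop_eq (s : Int) : ∀ (d : List Int) (a : Int),
    solvePop s d a = (d.dropWhile (fun v => decide (s ≤ v)),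
      a + ((d.takeWhile (fun v => decide (s ≤ v))).length : Int)) := by
  intro d
  induction d with
  | nil => intro a; simp [solvePop]
  | cons v t ihd =>
    intro a
    by_cases h : s ≤ v
    · simp only [solvePop, ihd (a + 1), List.takeWhile_cons, List.dropWhile_cons, h,
        decide_true, if_true, List.length_cons, Prod.mk.injEq]
      refine ⟨trivial, by push_cast; ring⟩
    · simp [solvePop, h]

lemma loopA_eq_loopC (mod : Int) (vs : List Int) (hs : vs.Pairwise (· ≤ ·)) :
    ∀ (saD : List Int) (k : Nat) (ret : Int),
      saD.Pairwise (fun a b => b ≤ a) → k ≤ vs.length →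
      (∀ x ∈ vs.drop k, ∀ s' ∈ saD, s' ≤ x) →
      solveLoop mod saD ((vs.take k).reverse) ((vs.length : Int) - k) ret
        = loopC mod vs saD ret := by
  intro saD
  induction saD with
  | nil => intro k ret _ _ _; rfl
  | cons s rest ih =>
    intro k ret hpw hk hdrop
    rcases List.pairwise_cons.mp hpw with ⟨hhead, htail⟩
    have hlen_take : (vs.take k).length = k := by rw [List.length_take]; omega
    set d := (vs.take k).reverse with hd
    set t := (d.takeWhile (fun v => decide (s ≤ v))).length with ht
    have hd_desc : d.Pairwise (fun a b : Int => b ≤ a) := by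
      rw [hd, List.pairwise_reverse]
      exact List.Pairwise.sublist (List.take_sublist k vs) hs
    have htk : t ≤ k := by
      have h1 := List.Sublist.length_le
        (List.takeWhile_sublist (p := fun v => decide (s ≤ v)) (l := d))
      rw [ht]
      calc (d.takeWhile (fun v => decide (s ≤ v))).length ≤ d.length := h1
        _ = k := by rw [hd, List.length_reverse, hlen_take]
    have htw : d.takeWhile (fun v => decide (s ≤ v)) = d.filter (fun v => decide (s ≤ v)) :=
      takeWhile_eq_filter_of_desc s d hd_desc
    have htf : t = ((vs.take k).filter (fun v => decide (s ≤ v))).length := by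
      rw [ht, htw, hd, List.filter_reverse, List.length_reverse]
    have hdropfull : (vs.drop k).filter (fun v => decide (s ≤ v)) = vs.drop k := by
      refine List.filter_eq_self.mpr ?_
      intro a ha
      simp only [decide_eq_true_eq]
      exact hdrop a ha s List.mem_cons_self
    have hcnt : cntGe vs s = (vs.length - k) + t := by
      unfold cntGe
      conv_lhs => rw [← List.take_append_drop k vs]
      rw [List.filter_append, List.length_append, hdropfull, List.length_drop, htf]
      omega
    have hamt : ((vs.length : Int) - k) + (t : Int) = (cntGe vs s : Int) := by
      rw [hcnt]; push_cast; omega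
    -- the remaining values after the inner while: the ascending prefix below s, reversed
    have h1 : d.drop t = d.dropWhile (fun v => decide (s ≤ v)) := by
      conv_lhs => rw [show d = d.takeWhile (fun v => decide (s ≤ v))
          ++ d.dropWhile (fun v => decide (s ≤ v)) from List.takeWhile_append_dropWhile.symm]
      rw [ht]
      exact List.drop_left
    have h2 : (vs.take (k - t)).reverse = d.drop t := by
      have h3 : vs.take (k - t) = (vs.take k).take (k - t) := by
        rw [List.take_take]; congr 1; omega
      rw [h3, List.reverse_take, hd, hlen_take]
      congr 1; omega
    have hdw : d.dropWhile (fun v => decide (s ≤ v)) = (vs.take (k - t)).reverse := by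
      rw [h2, h1]
    have hsplit : vs.take k = vs.take (k - t) ++ (d.takeWhile (fun v => decide (s ≤ v))).reverse := by
      have h3 : vs.take k = d.reverse := by rw [hd, List.reverse_reverse]
      rw [h3]
      conv_lhs => rw [show d = d.takeWhile (fun v => decide (s ≤ v))
          ++ d.dropWhile (fun v => decide (s ≤ v)) from List.takeWhile_append_dropWhile.symm]
      rw [List.reverse_append, hdw, List.reverse_reverse]
    have hdrop' : ∀ x ∈ vs.drop (k - t), ∀ s' ∈ rest, s' ≤ x := by
      intro x hx s' hs'
      have h4 : vs.drop (k - t) = (vs.take k).drop (k - t) ++ vs.drop k := by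
        conv_lhs => rw [← List.take_append_drop k vs]
        rw [List.drop_append_of_le_length (by rw [hlen_take]; omega)]
      have h5 : (vs.take k).drop (k - t) = (d.takeWhile (fun v => decide (s ≤ v))).reverse := by
        rw [hsplit]
        have h6 : (vs.take (k - t)).length = k - t := by rw [List.length_take]; omega
        exact List.drop_left' h6
      rw [h4, h5] at hx
      rcases List.mem_append.mp hx with hxa | hxb
      · have h7 := List.mem_takeWhile_imp (List.mem_reverse.mp hxa)
        simp only [decide_eq_true_eq] at h7
        exact le_trans (hhead s' hs') h7
      · exact hdrop x hxb s' (List.mem_cons_of_mem _ hs')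
    -- one step of both loops
    simp only [solveLoop, loopC]
    rw [solvePop_eq s d ((vs.length : Int) - k)]
    simp only
    rw [← ht, hamt]
    by_cases h0 : (cntGe vs s : Int) = 0
    · rw [if_pos h0, if_pos h0]
    · rw [if_neg h0, if_neg h0, hdw]
      have harg : (cntGe vs s : Int) = (vs.length : Int) - ((k - t : Nat) : Int) := by
        rw [hcnt]; push_cast; omega
      rw [harg]
      exact ih (k - t) _ htail (by omega) hdrop'

lemma salary_desc_eq (salary : List Int) :
    (PySem.List.sorted salary (fun x => x)).reverse
      = PySem.List.sorted salary (fun x => x) true := by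
  refine List.eq_of_perm_of_sorted (le := fun a b : Int => b ≤ a) ?_ ?_ ?_ ?_
  · intro a b _ _ h1 h2; omega
  · rw [List.pairwise_reverse]
    exact PySem.List.sorted_pairwise salary (fun x => x)
  · exact PySem.List.sorted_pairwise_rev salary (fun x => x)
  · exact ((List.reverse_perm _).trans (PySem.List.sorted_perm salary (fun x => x) false)).trans
      (PySem.List.sorted_perm salary (fun x => x) true).symm

-- ===== VERDICT (by name: the statement is the Claim_ definition above) =====
theorem solve_spec : Claim_equal_solve := by
  unfold Claim_equal_solve
  intro values salary mod _ _
  unfold Spec_solve solve solve_alt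
  rw [← salary_desc_eq]
  have hs : (PySem.List.sorted values (fun x => x)).Pairwise (· ≤ ·) :=
    PySem.List.sorted_pairwise values (fun x => x)
  rw [loopB_eq_loopC mod _ hs]
  have hpw : ((PySem.List.sorted salary (fun x => x)).reverse).Pairwise
      (fun a b : Int => b ≤ a) := by
    rw [List.pairwise_reverse]
    exact PySem.List.sorted_pairwise salary (fun x => x)
  have h := loopA_eq_loopC mod (PySem.List.sorted values (fun x => x)) hs
    ((PySem.List.sorted salary (fun x => x)).reverse)
    (PySem.List.sorted values (fun x => x)).length 1 hpw le_rfl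
    (by simp only [List.drop_length]
        intro x hx
        simp at hx)
  rw [List.take_length, sub_self] at h
  exact h
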